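-- pv_equiv track=rewrite | github.com/norheim/minimdo | applications/benchmarks/coupledgrad.py | get_allvars
-- ===== SOURCE A (Python) =====
-- from itertools import chain
--
-- def get_allvars(Fs):
--     _,allout,allin = zip(*Fs)
--     allvars = ()
--     for vrs in chain(allout,allin):
--         allvars += tuple(vr for vr in vrs if vr not in allvars)
--     coupled_out = ()
--     for vrs in allout:
--         coupled_out +=tuple(vr for vr in vrs if vr not in coupled_out)
--     coupled_in = ()
--     for vrs in allin:
--         coupled_in +=tuple(vr for vr in vrs if (
--             (vr not in coupled_in) and (vr not in coupled_out)))
--     return allvars, coupled_in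
-- ===== SOURCE B (Python) =====
-- def get_allvars(Fs):
--     _, allout, allin = zip(*Fs)
--     seen = set()
--     coupled_out = ()
--     for vrs in allout:
--         coupled_out += tuple(vr for vr in vrs if vr not in seen)
--         seen.update(vrs)
--     coupled_in = ()
--     for vrs in allin:
--         coupled_in += tuple(vr for vr in vrs if vr not in seen)
--         seen.update(vrs)
--     return coupled_out + coupled_in, coupled_in
-- ===== Notes on version B (the rewrite author's own statement) =====
-- stated objective: faster
-- what changed: B drops A's independent third scan (allvars is derived as coupled_out + coupled_in by concatenation) and replaces A's O(n) tuple-membership tests with a hash set of seen variables maintained across both remaining loops.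
-- outside the precondition, e.g. on get_allvars([]): A raises ValueError, B raises ValueError
import Mathlib
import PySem

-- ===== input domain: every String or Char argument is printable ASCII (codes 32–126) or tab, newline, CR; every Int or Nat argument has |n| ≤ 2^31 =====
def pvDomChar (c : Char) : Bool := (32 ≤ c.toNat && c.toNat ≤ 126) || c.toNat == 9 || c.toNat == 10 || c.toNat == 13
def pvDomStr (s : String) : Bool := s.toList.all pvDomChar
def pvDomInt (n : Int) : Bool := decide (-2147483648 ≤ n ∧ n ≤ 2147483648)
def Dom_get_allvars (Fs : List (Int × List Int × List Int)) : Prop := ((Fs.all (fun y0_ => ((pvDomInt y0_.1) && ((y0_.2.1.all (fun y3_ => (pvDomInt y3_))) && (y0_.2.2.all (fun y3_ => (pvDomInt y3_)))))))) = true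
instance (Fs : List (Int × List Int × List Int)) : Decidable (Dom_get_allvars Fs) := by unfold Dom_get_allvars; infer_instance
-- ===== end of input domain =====

-- B drops A's third scan: it keeps an O(1)-membership seen-set while building coupled_out and
-- coupled_in, and derives allvars as their concatenation (objective: faster membership, fewer scans).


-- ===== PORT A =====
-- 'allvars += tuple(vr for vr in vrs if vr not in allvars)'
def pvStepA (acc : List Int) (vrs : List Int) : List Int :=
  acc ++ vrs.filter (fun vr => decide (vr ∉ acc))

-- 'coupled_in += tuple(vr for vr in vrs if (vr not in coupled_in) and (vr not in coupled_out))'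
def pvStepIn (co : List Int) (acc : List Int) (vrs : List Int) : List Int :=
  acc ++ vrs.filter (fun vr => decide (vr ∉ acc) && decide (vr ∉ co))

def get_allvars (Fs : List (Int × List Int × List Int)) : List Int × List Int :=
  let allout := Fs.map (fun f => f.2.1)
  let allin := Fs.map (fun f => f.2.2)
  let allvars := (allout ++ allin).foldl pvStepA []      -- for vrs in chain(allout, allin)
  let coupled_out := allout.foldl pvStepA []
  let coupled_in := allin.foldl (pvStepIn coupled_out) []
  (allvars, coupled_in)

-- ===== PORT B =====
-- one loop step of B: append the not-yet-seen variables, then seen.update(vrs)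
def pvStepB (st : List Int × PySem.Set Int) (vrs : List Int) : List Int × PySem.Set Int :=
  (st.1 ++ vrs.filter (fun vr => !(PySem.Set.contains st.2 vr)), PySem.Set.update st.2 vrs)

def get_allvars_alt (Fs : List (Int × List Int × List Int)) : List Int × List Int :=
  let allout := Fs.map (fun f => f.2.1)
  let allin := Fs.map (fun f => f.2.2)
  let out_st := allout.foldl pvStepB ([], PySem.Set.empty)
  let coupled_out := out_st.1
  let in_st := allin.foldl pvStepB ([], out_st.2)
  let coupled_in := in_st.1
  (coupled_out ++ coupled_in, coupled_in)

-- ===== PRECONDITION & SPEC =====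
-- Pre_ excludes only the empty list, on which A's unpack '_,allout,allin = zip(*Fs)' raises ValueError.
def Pre_get_allvars (Fs : List (Int × List Int × List Int)) : Prop := Fs ≠ []
instance (Fs : List (Int × List Int × List Int)) : Decidable (Pre_get_allvars Fs) := by unfold Pre_get_allvars; infer_instance
def pvWitness_get_allvars : (List (Int × List Int × List Int)) := [(1, [2, 3], [4])]

def Spec_get_allvars (Fs : List (Int × List Int × List Int)) (out : List Int × List Int) : Prop := out = get_allvars_alt Fs
instance (Fs : List (Int × List Int × List Int)) (out : List Int × List Int) : Decidable (Spec_get_allvars Fs out) := by unfold Spec_get_allvars; infer_instance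

-- ===== CLAIM (what is proved, stated in full; the proofs are below) =====
def Claim_equal_get_allvars : Prop := ∀ (Fs : List (Int × List Int × List Int)), Dom_get_allvars Fs → Pre_get_allvars Fs → Spec_get_allvars Fs (get_allvars Fs)

-- ===== LEMMAS AND PROOFS =====

-- B's loop, run with a seen-set whose members are those of acc together with co,
-- computes A's corresponding list loop; the invariant is preserved.
theorem pvStepB_tracks (co : List Int) :
    ∀ (L : List (List Int)) (acc : List Int) (seen : PySem.Set Int),
      (∀ v, v ∈ seen ↔ v ∈ acc ∨ v ∈ co) →
      (L.foldl pvStepB (acc, seen)).1 = L.foldl (pvStepIn co) acc ∧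
      (∀ v, v ∈ (L.foldl pvStepB (acc, seen)).2 ↔ v ∈ L.foldl (pvStepIn co) acc ∨ v ∈ co) := by
  intro L
  induction L with
  | nil => intro acc seen h; exact ⟨rfl, h⟩
  | cons vrs L ih =>
    intro acc seen h
    have hf : vrs.filter (fun vr => !(decide (vr ∈ seen))) =
        vrs.filter (fun vr => !decide (vr ∈ acc) && !decide (vr ∈ co)) := by
      apply List.filter_congr
      intro v _
      have := h v
      by_cases h1 : v ∈ acc <;> by_cases h2 : v ∈ co <;> simp_all
    have hstep : pvStepB (acc, seen) vrs = (pvStepIn co acc vrs, PySem.Set.update seen vrs) := by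
      simp [pvStepB, pvStepIn, hf]
    have hinv : ∀ v, v ∈ PySem.Set.update seen vrs ↔ v ∈ pvStepIn co acc vrs ∨ v ∈ co := by
      intro v
      simp only [PySem.Set.mem_update, h v, pvStepIn, List.mem_append, List.mem_filter,
        decide_eq_true_eq, Bool.and_eq_true]
      by_cases h1 : v ∈ acc <;> by_cases h2 : v ∈ co <;> by_cases h3 : v ∈ vrs <;> simp_all
    simpa [List.foldl_cons, hstep] using ih (pvStepIn co acc vrs) (PySem.Set.update seen vrs) hinv

-- with nothing excluded, A's in-style step is A's plain step
theorem foldl_pvStepIn_nil :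
    ∀ (L : List (List Int)) (acc : List Int),
      L.foldl (pvStepIn []) acc = L.foldl pvStepA acc := by
  intro L
  induction L with
  | nil => intro acc; rfl
  | cons vrs L ih =>
    intro acc
    have : pvStepIn [] acc vrs = pvStepA acc vrs := by
      simp [pvStepIn, pvStepA]
    simp [List.foldl_cons, this, ih]

-- A's allvars scan, continued from co ++ acc, is co followed by the coupled_in-style scan
theorem foldl_pvStepA_append (co : List Int) :
    ∀ (L : List (List Int)) (acc : List Int),
      L.foldl pvStepA (co ++ acc) = co ++ L.foldl (pvStepIn co) acc := by
  intro L
  induction L with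
  | nil => intro acc; rfl
  | cons vrs L ih =>
    intro acc
    have hf : vrs.filter (fun vr => !decide (vr ∈ co) && !decide (vr ∈ acc)) =
        vrs.filter (fun vr => !decide (vr ∈ acc) && !decide (vr ∈ co)) := by
      apply List.filter_congr
      intro v _
      by_cases h1 : v ∈ acc <;> by_cases h2 : v ∈ co <;> simp_all
    have : pvStepA (co ++ acc) vrs = co ++ pvStepIn co acc vrs := by
      simp [pvStepA, pvStepIn, hf, List.append_assoc]
    simp [List.foldl_cons, this, ih]

-- ===== VERDICT (by name: the statement is the Claim_ definition above) =====
theorem get_allvars_spec : Claim_equal_get_allvars := by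
  intro Fs _ _
  unfold Spec_get_allvars get_allvars get_allvars_alt
  set allout := Fs.map (fun f => f.2.1) with hout
  set allin := Fs.map (fun f => f.2.2) with hin
  have hB0 := pvStepB_tracks [] allout [] PySem.Set.empty (by simp [PySem.Set.empty])
  have hco : (allout.foldl pvStepB ([], PySem.Set.empty)).1 = allout.foldl pvStepA [] := by
    rw [hB0.1, foldl_pvStepIn_nil]
  have hB1 := pvStepB_tracks (allout.foldl pvStepA []) allin []
      (allout.foldl pvStepB ([], PySem.Set.empty)).2
      (by intro v; have := hB0.2 v; rw [foldl_pvStepIn_nil] at this; simpa using this)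
  have hci : (allin.foldl pvStepB ([], (allout.foldl pvStepB ([], PySem.Set.empty)).2)).1 =
      allin.foldl (pvStepIn (allout.foldl pvStepA [])) [] := hB1.1
  have hall : (allout ++ allin).foldl pvStepA [] =
      allout.foldl pvStepA [] ++ allin.foldl (pvStepIn (allout.foldl pvStepA [])) [] := by
    rw [List.foldl_append]
    have := foldl_pvStepA_append (allout.foldl pvStepA []) allin []
    simpa using this
  simp only [hco, hci, hall]
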